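-- pv_equiv track=rewrite | github.com/MrBrantCode/unitest_baseline | mut_generate/mist_train_cf/cf_64097/solution.py | max_common_substring_length
-- ===== SOURCE A (Python) =====
-- def max_common_substring_length(s, t, u):
--   max_length = 0
--   min_length_string = min(s, t, u, key=len)
--   vowels = set('aeiouAEIOU')
--
--   for i in range(len(min_length_string)):
--     for j in range(i+1, len(min_length_string)+1):
--       substring = min_length_string[i:j]
--
--       if not any(char in vowels for char in substring):
--         if substring in s and substring in t and substring in u:
--           max_length = max(max_length, len(substring))
--
--   return max_length
-- ===== SOURCE B (Python) =====
-- def max_common_substring_length(s, t, u):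
--     vowels = 'aeiouAEIOU'
--     m = min(s, t, u, key=len)
--     n = len(m)
--     best = 0
--     for i in range(n):
--         # Grow the window [i:j] while it stays vowel-free and common to all
--         # three strings; every condition is prefix-closed, so the first failure
--         # ends the only candidates starting at i.
--         j = i
--         while j < n and m[j] not in vowels and m[i:j+1] in s and m[i:j+1] in t and m[i:j+1] in u:
--             j += 1
--         if j - i > best:
--             best = j - i
--     return best
-- ===== Notes on version B (the rewrite author's own statement) =====
-- stated objective: alternative
-- what changed: Instead of testing every substring of the shortest string, B grows one window per start index and stops at the first failing condition, exploiting that vowel-freeness and common-substring membership are prefix-closed.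
import Mathlib
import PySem

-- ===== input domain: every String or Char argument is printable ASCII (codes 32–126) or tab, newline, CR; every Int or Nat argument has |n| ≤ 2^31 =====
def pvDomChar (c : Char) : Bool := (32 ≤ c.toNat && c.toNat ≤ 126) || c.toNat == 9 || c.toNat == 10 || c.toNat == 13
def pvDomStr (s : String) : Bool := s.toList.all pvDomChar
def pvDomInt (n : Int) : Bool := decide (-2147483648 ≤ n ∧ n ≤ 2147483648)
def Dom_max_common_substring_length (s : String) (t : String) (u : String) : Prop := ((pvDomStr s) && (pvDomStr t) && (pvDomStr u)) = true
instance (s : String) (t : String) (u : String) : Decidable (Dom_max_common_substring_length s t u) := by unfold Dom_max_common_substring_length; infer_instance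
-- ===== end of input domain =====

-- B replaces A's scan of all substrings of the shortest string by a per-start-index window that
-- grows until the first failing (prefix-closed) condition.

-- ===== PORT A =====
-- vowels = set('aeiouAEIOU')
def pvVowelSet : PySem.Set Char := PySem.Set.ofList "aeiouAEIOU".toList

def max_common_substring_length (s : String) (t : String) (u : String) : Int :=
  -- min(s, t, u, key=len): first string of minimal length (the default argument is never used:
  -- the list is nonempty)
  let min_length_string := PySem.List.minD [s, t, u] PySem.Str.len s
  let ml := min_length_string.toList
  (PySem.List.pyRange 0 (PySem.Str.len min_length_string)).foldl (fun max_length i =>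
    (PySem.List.pyRange (i + 1) (PySem.Str.len min_length_string + 1)).foldl (fun max_length j =>
      let substring := PySem.List.slice ml (some i) (some j)
      if !(substring.any (fun c => PySem.Set.contains pvVowelSet c)) then
        if PySem.Chars.isIn substring s.toList && PySem.Chars.isIn substring t.toList &&
           PySem.Chars.isIn substring u.toList then
          max max_length (substring.length : Int)
        else max_length
      else max_length) max_length) 0

-- ===== PORT B =====
-- the while loop of Source B: grow j while j < n and m[j] not in vowels and m[i:j+1] in s/t/u;
-- indices here satisfy 0 ≤ i ≤ j < n, where the slice m[i:j+1] is exactly (drop i).take (j+1-i)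
-- and m[j] is exactly ml[j]
def pvGrow (ml ls lt lu : List Char) (i j : Nat) : Nat :=
  if h : j < ml.length then
    if !(PySem.Chars.isIn [ml[j]] "aeiouAEIOU".toList)
        && PySem.Chars.isIn ((ml.drop i).take (j + 1 - i)) ls
        && PySem.Chars.isIn ((ml.drop i).take (j + 1 - i)) lt
        && PySem.Chars.isIn ((ml.drop i).take (j + 1 - i)) lu then
      pvGrow ml ls lt lu i (j + 1)
    else j
  else j
termination_by ml.length - j

def max_common_substring_length_alt (s : String) (t : String) (u : String) : Int :=
  let m := PySem.List.minD [s, t, u] PySem.Str.len s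
  let ml := m.toList
  let n := ml.length
  -- for i in range(n): exact, n is a nonnegative length
  (List.range n).foldl (fun best i =>
    let j := pvGrow ml s.toList t.toList u.toList i i
    if (j : Int) - (i : Int) > best then (j : Int) - (i : Int) else best) 0

-- ===== PRECONDITION & SPEC =====
def Spec_max_common_substring_length (s : String) (t : String) (u : String) (out : Int) : Prop := out = max_common_substring_length_alt s t u
instance (s : String) (t : String) (u : String) (out : Int) : Decidable (Spec_max_common_substring_length s t u out) := by unfold Spec_max_common_substring_length; infer_instance

-- ===== CLAIM (what is proved, stated in full; the proofs are below) =====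
def Claim_equal_max_common_substring_length : Prop := ∀ (s : String) (t : String) (u : String), Dom_max_common_substring_length s t u → Spec_max_common_substring_length s t u (max_common_substring_length s t u)

-- ===== LEMMAS AND PROOFS =====

-- the window m[i:j] as a list
def pvWin (ml : List Char) (i j : Nat) : List Char := (ml.drop i).take (j - i)

-- A's test on the window (i, j): vowel-free and a substring of all three strings
def pvCond (ml ls lt lu : List Char) (i j : Nat) : Bool :=
  !((pvWin ml i j).any (fun c => PySem.Set.contains pvVowelSet c)) &&
  (PySem.Chars.isIn (pvWin ml i j) ls && PySem.Chars.isIn (pvWin ml i j) lt &&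
   PySem.Chars.isIn (pvWin ml i j) lu)

lemma pvWin_succ (ml : List Char) (i j : Nat) (hij : i ≤ j) (h : j < ml.length) :
    pvWin ml i (j + 1) = pvWin ml i j ++ [ml[j]] := by
  unfold pvWin
  have h1 : j + 1 - i = (j - i) + 1 := by omega
  rw [h1, List.take_add_one, List.getElem?_drop]
  have h2 : i + (j - i) = j := by omega
  simp [h2, h]

lemma pvIsIn_of_append (w : List Char) (c : Char) (x : List Char)
    (h : PySem.Chars.isIn (w ++ [c]) x = true) : PySem.Chars.isIn w x = true := by
  rw [PySem.Chars.isIn_iff_infix] at h ⊢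
  exact ((List.prefix_append w [c]).isInfix).trans h

lemma pvVowelChar (c : Char) :
    PySem.Chars.isIn [c] "aeiouAEIOU".toList = PySem.Set.contains pvVowelSet c := by
  rw [Bool.eq_iff_iff, PySem.Chars.isIn_iff_infix, List.singleton_infix_iff,
    PySem.Set.contains_iff, pvVowelSet, PySem.Set.mem_ofList]

lemma pvCond_step (ml ls lt lu : List Char) (i j : Nat) (hij : i ≤ j) (h : j < ml.length)
    (hc : pvCond ml ls lt lu i (j + 1) = true) : pvCond ml ls lt lu i j = true := by
  unfold pvCond at hc ⊢
  rw [pvWin_succ ml i j hij h] at hc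
  simp only [Bool.and_eq_true, Bool.not_eq_true', List.any_append, Bool.or_eq_false_iff] at hc ⊢
  obtain ⟨⟨h0, _⟩, ⟨hs, ht⟩, hu⟩ := hc
  exact ⟨h0, ⟨pvIsIn_of_append _ _ _ hs, pvIsIn_of_append _ _ _ ht⟩, pvIsIn_of_append _ _ _ hu⟩

lemma pvCond_of_le (ml ls lt lu : List Char) (i a b : Nat) (hb : pvCond ml ls lt lu i b = true)
    (hia : i ≤ a) (hab : a ≤ b) (hbl : b ≤ ml.length) : pvCond ml ls lt lu i a = true := by
  induction b with
  | zero => have : a = 0 := by omega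
            simpa [this] using hb
  | succ b ih =>
    rcases Nat.eq_or_lt_of_le hab with rfl | hlt
    · exact hb
    · have hc : pvCond ml ls lt lu i b = true :=
        pvCond_step ml ls lt lu i b (by omega) (by omega) hb
      exact ih hc (by omega) (by omega)

lemma pvCond_self (ml ls lt lu : List Char) (i : Nat) : pvCond ml ls lt lu i i = true := by
  simp [pvCond, pvWin, PySem.Chars.isIn_nil]

lemma pvCond_succ_iff (ml ls lt lu : List Char) (i j : Nat) (hij : i ≤ j) (h : j < ml.length)
    (hc : pvCond ml ls lt lu i j = true) :
    pvCond ml ls lt lu i (j + 1) = true ↔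
      (PySem.Chars.isIn [ml[j]] "aeiouAEIOU".toList = false ∧
       PySem.Chars.isIn (pvWin ml i (j + 1)) ls = true ∧
       PySem.Chars.isIn (pvWin ml i (j + 1)) lt = true ∧
       PySem.Chars.isIn (pvWin ml i (j + 1)) lu = true) := by
  unfold pvCond at hc ⊢
  simp only [Bool.and_eq_true, Bool.not_eq_true'] at hc ⊢
  rw [pvWin_succ ml i j hij h, List.any_append]
  simp only [hc.1, List.any_cons, List.any_nil, Bool.false_or, Bool.or_false, pvVowelChar]
  rw [← pvWin_succ ml i j hij h]
  tauto

lemma pvGrow_spec (ml ls lt lu : List Char) (i : Nat) :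
    ∀ n j, ml.length - j = n → i ≤ j → j ≤ ml.length → pvCond ml ls lt lu i j = true →
      j ≤ pvGrow ml ls lt lu i j ∧ pvGrow ml ls lt lu i j ≤ ml.length ∧
      pvCond ml ls lt lu i (pvGrow ml ls lt lu i j) = true ∧
      (pvGrow ml ls lt lu i j < ml.length →
        pvCond ml ls lt lu i (pvGrow ml ls lt lu i j + 1) = false) := by
  intro n
  induction n with
  | zero =>
    intro j hn hij hjl hc
    have hlt : ¬ j < ml.length := by omega
    rw [pvGrow, dif_neg hlt]
    exact ⟨le_refl _, hjl, hc, fun h => absurd h hlt⟩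
  | succ n ih =>
    intro j hn hij hjl hc
    have hjlt : j < ml.length := by omega
    rw [pvGrow]
    simp only [hjlt, dif_pos]
    have hiff := pvCond_succ_iff ml ls lt lu i j hij hjlt hc
    by_cases hg : (!(PySem.Chars.isIn [ml[j]] "aeiouAEIOU".toList)
        && PySem.Chars.isIn ((ml.drop i).take (j + 1 - i)) ls
        && PySem.Chars.isIn ((ml.drop i).take (j + 1 - i)) lt
        && PySem.Chars.isIn ((ml.drop i).take (j + 1 - i)) lu) = true
    · rw [if_pos hg]
      have hg' := hg
      simp only [Bool.and_eq_true, Bool.not_eq_true'] at hg'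
      have hc' : pvCond ml ls lt lu i (j + 1) = true := by
        rw [hiff]
        exact ⟨hg'.1.1.1, hg'.1.1.2, hg'.1.2, hg'.2⟩
      have := ih (j + 1) (by omega) (by omega) (by omega) hc'
      exact ⟨by omega, this.2.1, this.2.2.1, this.2.2.2⟩
    · rw [if_neg hg]
      refine ⟨le_refl _, by omega, hc, fun _ => ?_⟩
      by_contra hcs
      rw [Bool.not_eq_false, hiff] at hcs
      apply hg
      simp only [Bool.and_eq_true, Bool.not_eq_true']
      exact ⟨⟨⟨hcs.1, hcs.2.1⟩, hcs.2.2.1⟩, hcs.2.2.2⟩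

-- the good windows starting at i form the interval (i, pvGrow i i]
lemma pvCond_iff_le_grow (ml ls lt lu : List Char) (i : Nat) (hil : i ≤ ml.length)
    (j : Nat) (hij : i < j) (hjl : j ≤ ml.length) :
    (pvCond ml ls lt lu i j = true ↔ j ≤ pvGrow ml ls lt lu i i) := by
  obtain ⟨h1, h2, h3, h4⟩ := pvGrow_spec ml ls lt lu i (ml.length - i) i rfl (le_refl i) hil
    (pvCond_self ml ls lt lu i)
  constructor
  · intro hc
    by_contra hgt
    have hJlt : pvGrow ml ls lt lu i i < ml.length := by omega
    have := pvCond_of_le ml ls lt lu i (pvGrow ml ls lt lu i i + 1) j hc (by omega) (by omega) hjl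
    rw [h4 hJlt] at this
    exact Bool.false_ne_true this
  · intro hle
    exact pvCond_of_le ml ls lt lu i j (pvGrow ml ls lt lu i i) h3 (by omega) hle h2

lemma pvPyRangeNat (a b : Nat) :
    PySem.List.pyRange (a : Int) (b : Int) = List.map (fun k : Nat => (k : Int)) (List.range' a (b - a)) := by
  obtain ⟨n, hn⟩ : ∃ n, b - a = n := ⟨b - a, rfl⟩
  rw [hn]
  induction n generalizing a with
  | zero =>
    have hempty : PySem.List.pyRange (a : Int) (b : Int) = [] := by
      simp [PySem.List.pyRange]
      omega
    rw [hempty]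
    simp
  | succ n ih =>
    have hab : (a : Int) < (b : Int) := by omega
    have hcast : (a : Int) + 1 = ((a + 1 : Nat) : Int) := by push_cast; ring
    rw [PySem.List.pyRange_one_cons hab, hcast, ih (a + 1) (by omega), List.range'_succ]
    simp

lemma pvFilterRange (J : Nat) : ∀ (n a : Nat),
    (List.range' a n).filter (fun j => decide (j ≤ J)) = List.range' a (min n (J + 1 - a)) := by
  intro n
  induction n with
  | zero => intro a; simp
  | succ n ih =>
    intro a
    rw [List.range'_succ]
    by_cases ha : a ≤ J
    · have h1 : min (n + 1) (J + 1 - a) = min n (J + 1 - (a + 1)) + 1 := by omega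
      rw [h1, List.range'_succ, List.filter_cons]
      simp only [ha, decide_true, if_pos]
      rw [ih (a + 1)]
    · have h1 : min (n + 1) (J + 1 - a) = 0 := by omega
      have h2 : J + 1 - (a + 1) = 0 := by omega
      rw [h1, List.filter_cons]
      simp only [ha, decide_false]
      rw [ih (a + 1), h2]
      simp

lemma pvMaxFold (i : Nat) : ∀ (k : Nat) (a : Int), 0 ≤ a →
    List.foldl (fun acc (j : Nat) => max acc ((j : Int) - (i : Int))) a (List.range' (i + 1) k) =
      max a (k : Int) := by
  intro k
  induction k with
  | zero => intro a ha; simp; omega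
  | succ k ih =>
    intro a ha
    rw [List.range'_concat, List.foldl_append, ih a ha]
    simp only [List.foldl_cons, List.foldl_nil]
    push_cast
    omega

-- a foldl congruence that may carry an invariant of the accumulator
lemma pvFoldInv {α : Type} (l : List α) (f g : Int → α → Int) (P : Int → Prop)
    (hP : ∀ a x, x ∈ l → P a → P (f a x))
    (hfg : ∀ a x, x ∈ l → P a → f a x = g a x) :
    ∀ a, P a → l.foldl f a = l.foldl g a := by
  induction l with
  | nil => intro a _; rfl
  | cons x xs ih =>
    intro a ha
    simp only [List.foldl_cons]
    rw [hfg a x (by simp) ha]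
    rw [← hfg a x (by simp) ha]
    exact ih (fun b y hy hb => hP b y (by simp [hy]) hb)
      (fun b y hy hb => hfg b y (by simp [hy]) hb) (f a x) (hP a x (by simp) ha)

-- the inner loop of A, for a fixed start index i, computes max(acc, pvGrow i i - i)
lemma pvInner (ml ls lt lu : List Char) (i : Nat) (hil : i < ml.length) (a : Int) (ha : 0 ≤ a) :
    (PySem.List.pyRange ((i : Int) + 1) ((ml.length : Int) + 1)).foldl (fun max_length j =>
      let substring := PySem.List.slice ml (some (i : Int)) (some j)
      if !(substring.any (fun c => PySem.Set.contains pvVowelSet c)) then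
        if PySem.Chars.isIn substring ls && PySem.Chars.isIn substring lt &&
           PySem.Chars.isIn substring lu then
          max max_length (substring.length : Int)
        else max_length
      else max_length) a =
    max a ((pvGrow ml ls lt lu i i : Int) - (i : Int)) := by
  obtain ⟨h1, h2, h3, h4⟩ := pvGrow_spec ml ls lt lu i (ml.length - i) i rfl (le_refl i)
    (by omega) (pvCond_self ml ls lt lu i)
  set J := pvGrow ml ls lt lu i i with hJ
  have hcast1 : (i : Int) + 1 = ((i + 1 : Nat) : Int) := by push_cast; ring
  have hcast2 : (ml.length : Int) + 1 = ((ml.length + 1 : Nat) : Int) := by push_cast; ring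
  rw [hcast1, hcast2, pvPyRangeNat, List.foldl_map]
  have hlen : ml.length + 1 - (i + 1) = ml.length - i := by omega
  rw [hlen]
  have hbody : ∀ (b : Int) (j : Nat), j ∈ List.range' (i + 1) (ml.length - i) →
      ((fun max_length (j : Int) =>
        let substring := PySem.List.slice ml (some (i : Int)) (some j)
        if !(substring.any (fun c => PySem.Set.contains pvVowelSet c)) then
          if PySem.Chars.isIn substring ls && PySem.Chars.isIn substring lt &&
             PySem.Chars.isIn substring lu then
            max max_length (substring.length : Int)
          else max_length
        else max_length) b (j : Int)) =
      (if decide (j ≤ J) = true then max b ((j : Int) - (i : Int)) else b) := by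
    intro b j hj
    rw [List.mem_range'_1] at hj
    have hij : i + 1 ≤ j := hj.1
    have hjl : j ≤ ml.length := by omega
    simp only [PySem.List.slice_natCast]
    have hwin : List.take (j - i) (List.drop i ml) = pvWin ml i j := rfl
    rw [hwin]
    have hlensub : ((pvWin ml i j).length : Int) = (j : Int) - (i : Int) := by
      unfold pvWin
      rw [List.length_take, List.length_drop]
      have h5 : min (j - i) (ml.length - i) = j - i := by omega
      rw [h5]
      omega
    have hcond := pvCond_iff_le_grow ml ls lt lu i (by omega) j (by omega) hjl
    by_cases hjJ : j ≤ J
    · have hc : pvCond ml ls lt lu i j = true := hcond.mpr hjJ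
      unfold pvCond at hc
      simp only [Bool.and_eq_true, Bool.not_eq_true'] at hc
      obtain ⟨h0, ⟨hs, ht⟩, hu⟩ := hc
      simp only [h0, hs, ht, hu, Bool.not_false, if_pos, Bool.and_self, hjJ, decide_true,
        hlensub]
    · have hc : pvCond ml ls lt lu i j = false := by
        rw [← Bool.not_eq_true, hcond]; omega
      unfold pvCond at hc
      simp only [hjJ, decide_false]
      by_cases hvf : ((pvWin ml i j).any fun c => PySem.Set.contains pvVowelSet c) = true
      · simp only [hvf, Bool.not_true]
        simp
      · have hany : ((pvWin ml i j).any fun c => PySem.Set.contains pvVowelSet c) = false :=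
          Bool.eq_false_iff.mpr hvf
        have hm : (PySem.Chars.isIn (pvWin ml i j) ls && PySem.Chars.isIn (pvWin ml i j) lt &&
            PySem.Chars.isIn (pvWin ml i j) lu) = false := by
          rwa [hany, Bool.not_false, Bool.true_and] at hc
        simp only [hany, Bool.not_false, hm]
        simp
  have hcongr := PySem.List.foldl_congr_mem
    (l := List.range' (i + 1) (ml.length - i))
    (f := fun (x : Int) (y : Nat) =>
      let substring := PySem.List.slice ml (some (i : Int)) (some (y : Int))
      if !(substring.any fun c => PySem.Set.contains pvVowelSet c) then
        if PySem.Chars.isIn substring ls && PySem.Chars.isIn substring lt &&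
           PySem.Chars.isIn substring lu then
          max x (substring.length : Int)
        else x
      else x)
    (g := fun (b : Int) (j : Nat) => if decide (j ≤ J) = true then max b ((j : Int) - (i : Int)) else b)
    (init := a) (fun acc x hx => hbody acc x hx)
  rw [hcongr]
  rw [PySem.List.foldl_if_eq_foldl_filter (fun j => decide (j ≤ J))
    (fun b (j : Nat) => max b ((j : Int) - (i : Int)))]
  rw [pvFilterRange J (ml.length - i) (i + 1)]
  have hmin : min (ml.length - i) (J + 1 - (i + 1)) = J - i := by omega
  rw [hmin, pvMaxFold i (J - i) a ha]
  have : ((J - i : Nat) : Int) = (J : Int) - (i : Int) := by omega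
  rw [this]

-- ===== VERDICT (by name: the statement is the Claim_ definition above) =====
theorem max_common_substring_length_spec : Claim_equal_max_common_substring_length := by
  intro s t u _
  unfold Spec_max_common_substring_length max_common_substring_length
    max_common_substring_length_alt
  simp only [PySem.Str.len_eq]
  set m := PySem.List.minD [s, t, u] PySem.Str.len s with hm
  set ml := m.toList with hml
  rw [PySem.List.pyRange_zero_natCast, List.foldl_map]
  refine pvFoldInv (List.range ml.length) _ _ (fun a => 0 ≤ a) ?_ ?_ 0 (le_refl 0)
  · intro a i hi ha
    rw [List.mem_range] at hi
    have := pvInner ml s.toList t.toList u.toList i hi a ha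
    simp only [this]
    have h0 : (0 : Int) ≤ (pvGrow ml s.toList t.toList u.toList i i : Int) - (i : Int) ∨
        ((pvGrow ml s.toList t.toList u.toList i i : Int) - (i : Int)) ≤ a := by omega
    rcases le_total a ((pvGrow ml s.toList t.toList u.toList i i : Int) - (i : Int)) with h | h
    · rw [max_eq_right h]; omega
    · rw [max_eq_left h]; exact ha
  · intro a i hi ha
    rw [List.mem_range] at hi
    rw [pvInner ml s.toList t.toList u.toList i hi a ha]
    rw [max_def]
    split_ifs <;> omega
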